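-- pv_equiv track=rewrite | github.com/jps531/ms-hs-football-playoff-engine | prefect_files/scenarios.py | consolidate_opposites_and_remove_bases
-- ===== SOURCE A (Python) =====
-- def consolidate_opposites_and_remove_bases(candidate_minterms: list[dict[str, bool]]) -> list[dict[str, bool]]:
--     """Consolidate opposite-valued pairs and strip redundant base keys.
--
--     Performs two passes:
--     1. For any two dicts that differ in exactly one key's boolean value, merge
--        them by dropping that key (Quine-McCluskey single-variable absorption).
--     2. Within each resulting dict, remove any base key (e.g., ``"A>B"``) when a
--        GE-qualified variant (e.g., ``"A>B_GE1"``) is also present.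
--
--     Args:
--         candidate_minterms: List of boolean variable assignment dicts.
--
--     Returns:
--         A simplified list of dicts with redundant entries removed.
--     """
--     consolidated = []
--     used = set()
--
--     for i, d1 in enumerate(candidate_minterms):
--         if i in used:
--             continue
--         merged = False
--         for j, d2 in enumerate(candidate_minterms[i + 1 :], start=i + 1):
--             if j in used:
--                 continue
--             if set(d1.keys()) != set(d2.keys()):
--                 continue
--             differing = [k for k in d1 if d1[k] != d2[k]]
--             if len(differing) == 1:
--                 new_dict = {k: v for k, v in d1.items() if k != differing[0]}
--                 consolidated.append(new_dict)
--                 used.update({i, j})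
--                 merged = True
--                 break
--         if not merged:
--             consolidated.append(d1)
--
--     cleaned = []
--     for d in consolidated:
--         ge_bases = {k.split("_GE")[0] for k in d if "_GE" in k}
--         new_d = {k: v for k, v in d.items() if k.split("_GE")[0] not in ge_bases or "_GE" in k}
--         cleaned.append(new_d)
--
--     return cleaned
-- ===== SOURCE B (Python) =====
-- def consolidate_opposites_and_remove_bases(candidate_minterms):
--     """Hash-index variant: bucket every dict once under signatures
--     (key, sorted-other-items, value); a merge partner for d at key k is the
--     first later unused dict in bucket (key, sorted-other-items, not d[k]);
--     taking the smallest candidate index over d's keys reproduces the greedy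
--     first-match pairing without rescanning the whole tail.  Per-bucket
--     pointers skip dead entries (already passed or already used) amortizedly."""
--     buckets = {}
--     for j, d in enumerate(candidate_minterms):
--         items = sorted(d.items(), key=lambda kv: kv[0])
--         for k, v in d.items():
--             sig = (k, tuple(kv for kv in items if kv[0] != k), v)
--             buckets.setdefault(sig, []).append(j)
--
--     pos = {sig: 0 for sig in buckets}
--     used = [False] * len(candidate_minterms)
--     merged = []
--     for i, d in enumerate(candidate_minterms):
--         if used[i]:
--             continue
--         items = sorted(d.items(), key=lambda kv: kv[0])
--         best_j = None
--         best_k = None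
--         for k, v in d.items():
--             sig = (k, tuple(kv for kv in items if kv[0] != k), not v)
--             lst = buckets.get(sig, ())
--             p = pos.get(sig, 0)
--             while p < len(lst) and (lst[p] <= i or used[lst[p]]):
--                 p += 1
--             pos[sig] = p
--             if p < len(lst):
--                 j = lst[p]
--                 if best_j is None or j < best_j:
--                     best_j, best_k = j, k
--         if best_j is None:
--             merged.append(d)
--         else:
--             used[best_j] = True
--             merged.append({k2: v2 for k2, v2 in d.items() if k2 != best_k})
--
--     return [
--         {k: v for k, v in d.items()
--          if "_GE" in k
--          or all(not ("_GE" in k2 and k2.split("_GE")[0] == k.split("_GE")[0])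
--                 for k2 in d)}
--         for d in merged
--     ]
-- ===== Notes on version B (the rewrite author's own statement) =====
-- stated objective: alternative
-- what changed: A's inner rescan of the whole remaining list for each dict is replaced by a hash index built once: every dict is bucketed under signatures (key, sorted-other-items, value), a merge partner is found by looking up the flipped signature's bucket with a monotone per-bucket pointer that skips dead entries amortizedly, and taking the smallest candidate index over the dict's keys preserves A's greedy first-match pairing; the used-set becomes a boolean array.
import Mathlib
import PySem

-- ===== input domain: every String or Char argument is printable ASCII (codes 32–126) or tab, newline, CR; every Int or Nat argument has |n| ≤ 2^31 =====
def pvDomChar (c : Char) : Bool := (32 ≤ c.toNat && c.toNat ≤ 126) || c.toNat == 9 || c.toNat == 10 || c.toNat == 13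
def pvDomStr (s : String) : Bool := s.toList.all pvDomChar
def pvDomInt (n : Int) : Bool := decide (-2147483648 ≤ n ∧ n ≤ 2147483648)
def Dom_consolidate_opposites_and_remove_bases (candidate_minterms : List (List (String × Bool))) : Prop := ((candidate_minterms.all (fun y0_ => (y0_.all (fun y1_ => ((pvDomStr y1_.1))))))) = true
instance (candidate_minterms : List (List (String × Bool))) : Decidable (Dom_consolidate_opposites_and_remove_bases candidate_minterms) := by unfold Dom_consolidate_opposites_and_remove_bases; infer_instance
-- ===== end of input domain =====

-- B is a hash-index re-implementation: every dict is bucketed once under signatures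
-- (key, sorted-other-items, value); a merge partner is looked up in the bucket of the
-- flipped signature (with a monotone per-bucket pointer skipping dead entries), and the
-- smallest candidate index over the dict's keys reproduces A's greedy first-match pairing.
-- Neither program mutates its argument.

-- ===== PORT A =====
-- "_GE" in k
def pvAHasGE (k : String) : Bool := PySem.Str.isIn "_GE" k
-- k.split("_GE")[0]  (split with a non-empty separator is total and returns a non-empty list)
def pvABase (k : String) : String := ((PySem.Str.split? k "_GE").getD []).headD ""
-- set(d1.keys()) == set(d2.keys())
def pvAKeysEq (d1 d2 : List (String × Bool)) : Bool :=
  PySem.Set.equal (PySem.Set.ofList (d1.map Prod.fst)) (PySem.Set.ofList (d2.map Prod.fst))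
-- [k for k in d1 if d1[k] != d2[k]]; the d1[k]/d2[k] lookups are guarded by the key-set
-- equality test, so the `.getD false` fallback is never taken (keys unique under Pre_)
def pvADiffering (d1 d2 : List (String × Bool)) : List String :=
  (d1.map Prod.fst).filter (fun k => (d1.lookup k).getD false != (d2.lookup k).getD false)
-- the inner `for j, d2 in enumerate(candidate_minterms[i+1:], start=i+1)` loop
def pvAInner (d1 : List (String × Bool)) (used : PySem.Set Int) :
    List (Int × List (String × Bool)) → Option (Int × List (String × Bool))
  | [] => none
  | (j, d2) :: rest =>
    if PySem.Set.contains used j then pvAInner d1 used rest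
    else if pvAKeysEq d1 d2 = false then pvAInner d1 used rest
    else if (pvADiffering d1 d2).length == 1 then
      some (j, d1.filter (fun kv => kv.1 != (pvADiffering d1 d2).headD ""))
    else pvAInner d1 used rest
-- the outer `for i, d1 in enumerate(candidate_minterms)` loop, state (used, consolidated)
def pvAOuter : List (Int × List (String × Bool)) → PySem.Set Int → List (List (String × Bool)) → List (List (String × Bool))
  | [], _, acc => acc
  | (i, d1) :: rest, used, acc =>
    if PySem.Set.contains used i then pvAOuter rest used acc
    else
      match pvAInner d1 used rest with
      | some (j, nd) => pvAOuter rest (PySem.Set.update used [i, j]) (acc ++ [nd])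
      | none => pvAOuter rest used (acc ++ [d1])
-- second pass: ge_bases set comprehension + dict comprehension
def pvACleanOne (d : List (String × Bool)) : List (String × Bool) :=
  let ge_bases : PySem.Set String :=
    PySem.Set.ofList ((d.map Prod.fst).filterMap (fun k => if pvAHasGE k then some (pvABase k) else none))
  d.filter (fun kv => !(PySem.Set.contains ge_bases (pvABase kv.1)) || pvAHasGE kv.1)

def consolidate_opposites_and_remove_bases (candidate_minterms : List (List (String × Bool))) : List (List (String × Bool)) :=
  (pvAOuter (PySem.List.enumerate candidate_minterms) PySem.Set.empty []).map pvACleanOne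

-- ===== PORT B =====
def pvBHasGE (k : String) : Bool := PySem.Str.isIn "_GE" k
def pvBBase (k : String) : String := ((PySem.Str.split? k "_GE").getD []).headD ""
-- items = sorted(d.items(), key=lambda kv: kv[0])
def pvBSortedItems (d : List (String × Bool)) : List (String × Bool) :=
  PySem.List.sorted d (fun kv => kv.1) false
-- sig = (k, tuple(kv for kv in items if kv[0] != k), v)
def pvBSigOf (items : List (String × Bool)) (k : String) (v : Bool) :
    String × List (String × Bool) × Bool :=
  (k, items.filter (fun kv => kv.1 != k), v)
-- first pass: buckets.setdefault(sig, []).append(j) for every (k, v) of every dict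
def pvBBuckets (c : List (List (String × Bool))) :
    PySem.Dict (String × List (String × Bool) × Bool) (List Int) :=
  (PySem.List.enumerate c).foldl
    (fun b p =>
      p.2.foldl (fun b kv => b.modify (pvBSigOf (pvBSortedItems p.2) kv.1 kv.2) [] (· ++ [p.1])) b)
    PySem.Dict.empty
-- the `while p < len(lst) and (lst[p] <= i or used[lst[p]])` pointer advance
def pvBAdvance (lst : List Int) (i : Int) (w : List Bool) (p : Nat) : Nat :=
  if h : p < lst.length then
    if decide (lst[p] ≤ i) || PySem.List.pyGetD w lst[p] false then pvBAdvance lst i w (p + 1)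
    else p
  else p
termination_by lst.length - p
-- one step of the `for k, v in d.items()` loop: advance the bucket pointer, store it,
-- and compare the bucket entry at the pointer (if any) with the best candidate so far;
-- `if p < len(lst): j = lst[p]` is the in-range optional index lst[p]?
def pvBStepP (bk : PySem.Dict (String × List (String × Bool) × Bool) (List Int))
    (d : List (String × Bool)) (i : Int) (w : List Bool)
    (bp : Option (Int × String) × PySem.Dict (String × List (String × Bool) × Bool) Int)
    (kv : String × Bool) :
    Option (Int × String) × PySem.Dict (String × List (String × Bool) × Bool) Int :=
  match (bk.getD (pvBSigOf (pvBSortedItems d) kv.1 (!kv.2)) [])[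
      (pvBAdvance (bk.getD (pvBSigOf (pvBSortedItems d) kv.1 (!kv.2)) []) i w
        ((bp.2.getD (pvBSigOf (pvBSortedItems d) kv.1 (!kv.2)) 0).toNat))]? with
  | none => (bp.1, bp.2.insert (pvBSigOf (pvBSortedItems d) kv.1 (!kv.2))
      ((pvBAdvance (bk.getD (pvBSigOf (pvBSortedItems d) kv.1 (!kv.2)) []) i w
        ((bp.2.getD (pvBSigOf (pvBSortedItems d) kv.1 (!kv.2)) 0).toNat) : Nat) : Int))
  | some j =>
    (match bp.1 with
     | none => some (j, kv.1)
     | some q => if j < q.1 then some (j, kv.1) else some q,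
     bp.2.insert (pvBSigOf (pvBSortedItems d) kv.1 (!kv.2))
      ((pvBAdvance (bk.getD (pvBSigOf (pvBSortedItems d) kv.1 (!kv.2)) []) i w
        ((bp.2.getD (pvBSigOf (pvBSortedItems d) kv.1 (!kv.2)) 0).toNat) : Nat) : Int))
-- the whole `for k, v in d.items()` loop, returning (best, updated pos)
def pvBBestP (bk : PySem.Dict (String × List (String × Bool) × Bool) (List Int))
    (pos : PySem.Dict (String × List (String × Bool) × Bool) Int)
    (w : List Bool) (i : Int) (d : List (String × Bool)) :
    Option (Int × String) × PySem.Dict (String × List (String × Bool) × Bool) Int :=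
  d.foldl (pvBStepP bk d i w) (none, pos)
-- outer `for i, d in enumerate(candidate_minterms)` loop; used is the bool array
def pvBLoop (bk : PySem.Dict (String × List (String × Bool) × Bool) (List Int)) :
    List (Int × List (String × Bool)) → List Bool →
    PySem.Dict (String × List (String × Bool) × Bool) Int → List (List (String × Bool))
  | [], _, _ => []
  | (i, d) :: rest, w, pos =>
    if PySem.List.pyGetD w i false then pvBLoop bk rest w pos
    else
      match pvBBestP bk pos w i d with
      | (none, pos') => d :: pvBLoop bk rest w pos'
      | (some (j, k), pos') =>
        (d.filter (fun kv => kv.1 != k)) :: pvBLoop bk rest (PySem.List.pySetD w j true) pos'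
-- cleanup: keep k if it is GE-qualified or no GE-qualified key shares its base
def pvBCleanOne (d : List (String × Bool)) : List (String × Bool) :=
  d.filter (fun kv => pvBHasGE kv.1 ||
    d.all (fun kv2 => !(pvBHasGE kv2.1 && pvBBase kv2.1 == pvBBase kv.1)))

def consolidate_opposites_and_remove_bases_alt (candidate_minterms : List (List (String × Bool))) : List (List (String × Bool)) :=
  (pvBLoop (pvBBuckets candidate_minterms) (PySem.List.enumerate candidate_minterms)
      (List.replicate candidate_minterms.length false)
      -- pos = {sig: 0 for sig in buckets}
      ((pvBBuckets candidate_minterms).keys.foldl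
        (fun d s => d.insert s (0 : Int)) PySem.Dict.empty)).map pvBCleanOne

-- ===== PRECONDITION & SPEC =====
-- The inner lists model Python dicts, whose keys are necessarily distinct: an association
-- list with a duplicated key corresponds to no Python input, so Pre_ excludes only those.
def Pre_consolidate_opposites_and_remove_bases (candidate_minterms : List (List (String × Bool))) : Prop :=
  ∀ d ∈ candidate_minterms, (d.map Prod.fst).Nodup
instance (candidate_minterms : List (List (String × Bool))) : Decidable (Pre_consolidate_opposites_and_remove_bases candidate_minterms) := by unfold Pre_consolidate_opposites_and_remove_bases; infer_instance
def pvWitness_consolidate_opposites_and_remove_bases : (List (List (String × Bool))) :=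
  [[("A>B", true), ("A>B_GE1", true)], [("A>B", false), ("A>B_GE1", true)]]

def Spec_consolidate_opposites_and_remove_bases (candidate_minterms : List (List (String × Bool))) (out : List (List (String × Bool))) : Prop := out = consolidate_opposites_and_remove_bases_alt candidate_minterms
instance (candidate_minterms : List (List (String × Bool))) (out : List (List (String × Bool))) : Decidable (Spec_consolidate_opposites_and_remove_bases candidate_minterms out) := by unfold Spec_consolidate_opposites_and_remove_bases; infer_instance

-- ===== CLAIM (what is proved, stated in full; the proofs are below) =====
def Claim_equal_consolidate_opposites_and_remove_bases : Prop := ∀ (candidate_minterms : List (List (String × Bool))), Dom_consolidate_opposites_and_remove_bases candidate_minterms → Pre_consolidate_opposites_and_remove_bases candidate_minterms → Spec_consolidate_opposites_and_remove_bases candidate_minterms (consolidate_opposites_and_remove_bases candidate_minterms)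

-- ===== LEMMAS AND PROOFS =====

-- the pointer-free form of B's inner search (used as the proof's intermediate)
def pvBBest (bk : PySem.Dict (String × List (String × Bool) × Bool) (List Int))
    (w : List Bool) (i : Int) (d : List (String × Bool)) : Option (Int × String) :=
  d.foldl (fun best kv =>
    match (bk.getD (pvBSigOf (pvBSortedItems d) kv.1 (!kv.2)) []).find?
        (fun j => decide (i < j) && !(PySem.List.pyGetD w j false)) with
    | none => best
    | some j =>
      match best with
      | none => some (j, kv.1)
      | some q => if j < q.1 then some (j, kv.1) else some q) none
-- the pointer-free form of B's outer loop
def pvBLoopF (bk : PySem.Dict (String × List (String × Bool) × Bool) (List Int)) :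
    List (Int × List (String × Bool)) → List Bool → List (List (String × Bool))
  | [], _ => []
  | (i, d) :: rest, w =>
    if PySem.List.pyGetD w i false then pvBLoopF bk rest w
    else
      match pvBBest bk w i d with
      | none => d :: pvBLoopF bk rest w
      | some (j, k) => (d.filter (fun kv => kv.1 != k)) :: pvBLoopF bk rest (PySem.List.pySetD w j true)

def pvSigList (d : List (String × Bool)) : List (String × List (String × Bool) × Bool) :=
  d.map (fun kv => pvBSigOf (pvBSortedItems d) kv.1 kv.2)

lemma pvSigList_nodup (d : List (String × Bool)) (h : (d.map Prod.fst).Nodup) :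
    (pvSigList d).Nodup := by
  have hmap : (pvSigList d).map (fun s => s.1) = d.map Prod.fst := by
    unfold pvSigList
    rw [List.map_map]
    rfl
  exact (hmap ▸ h).of_map _

lemma pvFilter_singleton {α β : Type} [BEq β] [LawfulBEq β] (l : List α) (g : α → β) (s : β) (j : Int)
    (hnd : (l.map g).Nodup) :
    (l.filter (fun x => g x == s)).map (fun _ => j) = if s ∈ l.map g then [j] else [] := by
  induction l with
  | nil => simp
  | cons a tl ih =>
    rw [List.map_cons, List.nodup_cons] at hnd
    obtain ⟨hna, hntl⟩ := hnd
    rw [List.filter_cons]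
    by_cases ha : g a = s
    · have hb : (g a == s) = true := beq_iff_eq.2 ha
      rw [hb, if_pos rfl, List.map_cons, List.map_cons]
      have hmem : s ∈ g a :: List.map g tl := by rw [← ha]; exact List.mem_cons_self
      rw [if_pos hmem]
      have hftl : tl.filter (fun x => g x == s) = [] := by
        rw [List.filter_eq_nil_iff]
        intro x hx
        rw [beq_iff_eq]
        intro he
        exact hna (by rw [ha, ← he]; exact List.mem_map_of_mem hx)
      rw [hftl]
      rfl
    · have hb : (g a == s) = false := beq_eq_false_iff_ne.2 ha
      rw [hb, if_neg Bool.false_ne_true, ih hntl, List.map_cons]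
      by_cases hm : s ∈ List.map g tl
      · rw [if_pos hm, if_pos (List.mem_cons_of_mem _ hm)]
      · rw [if_neg hm, if_neg (by
          intro hc
          rcases List.mem_cons.1 hc with hc | hc
          · exact ha hc.symm
          · exact hm hc)]

lemma pvInner_char (d : List (String × Bool)) (j : Int)
    (b0 : PySem.Dict (String × List (String × Bool) × Bool) (List Int))
    (s : String × List (String × Bool) × Bool)
    (hnd : (pvSigList d).Nodup) :
    (d.foldl (fun b kv => b.modify (pvBSigOf (pvBSortedItems d) kv.1 kv.2) [] (· ++ [j])) b0).getD s []
      = b0.getD s [] ++ (if s ∈ pvSigList d then [j] else []) := by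
  have hfold : d.foldl (fun b kv => b.modify (pvBSigOf (pvBSortedItems d) kv.1 kv.2) [] (· ++ [j])) b0
      = (d.map (fun kv => (pvBSigOf (pvBSortedItems d) kv.1 kv.2, j))).foldl
          (fun b p => b.modify p.1 [] (· ++ [p.2])) b0 := by
    rw [List.foldl_map]
  rw [hfold, PySem.Dict.getD_foldl_modify_append]
  congr 1
  rw [List.filter_map]
  rw [List.map_map]
  have : ((fun p : (String × List (String × Bool) × Bool) × Int => p.2) ∘
      (fun kv : String × Bool => (pvBSigOf (pvBSortedItems d) kv.1 kv.2, j))) = (fun _ => j) := rfl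
  rw [this]
  have hpred : (fun p : (String × List (String × Bool) × Bool) × Int => p.1 == s) ∘
      (fun kv : String × Bool => (pvBSigOf (pvBSortedItems d) kv.1 kv.2, j))
      = fun kv : String × Bool => pvBSigOf (pvBSortedItems d) kv.1 kv.2 == s := rfl
  rw [hpred]
  exact pvFilter_singleton d (fun kv => pvBSigOf (pvBSortedItems d) kv.1 kv.2) s j hnd

lemma pvBuckets_fold_char (es : List (Int × List (String × Bool)))
    (b0 : PySem.Dict (String × List (String × Bool) × Bool) (List Int))
    (s : String × List (String × Bool) × Bool)
    (hnd : ∀ p ∈ es, (pvSigList p.2).Nodup) :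
    (es.foldl (fun b p =>
        p.2.foldl (fun b kv => b.modify (pvBSigOf (pvBSortedItems p.2) kv.1 kv.2) [] (· ++ [p.1])) b) b0).getD s []
      = b0.getD s [] ++ (es.filter (fun p => decide (s ∈ pvSigList p.2))).map (·.1) := by
  induction es generalizing b0 with
  | nil => simp
  | cons p rest ih =>
    rw [List.foldl_cons, ih _ (fun q hq => hnd q (List.mem_cons_of_mem _ hq)),
        pvInner_char p.2 p.1 b0 s (hnd p List.mem_cons_self), List.filter_cons]
    by_cases hm : s ∈ pvSigList p.2
    · rw [if_pos hm, if_pos (by simpa using hm), List.map_cons, List.append_assoc]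
      rfl
    · rw [if_neg hm, if_neg (by simpa using hm)]
      simp

lemma pvBuckets_char (c : List (List (String × Bool)))
    (hnd : ∀ d ∈ c, (pvSigList d).Nodup)
    (s : String × List (String × Bool) × Bool) :
    (pvBBuckets c).getD s []
      = ((PySem.List.enumerate c).filter (fun p => decide (s ∈ pvSigList p.2))).map (·.1) := by
  unfold pvBBuckets
  rw [pvBuckets_fold_char _ _ _ (by
    intro p hp
    rw [PySem.List.mem_enumerate_iff] at hp
    obtain ⟨k, hk, rfl⟩ := hp
    exact hnd _ (List.getElem_mem _))]
  rw [PySem.Dict.getD_empty, List.nil_append]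

-- a strictly increasing Int list: find? returns the minimum satisfying element
lemma pvFind_min_some (L : List Int) (p : Int → Bool) (j : Int)
    (hL : L.Pairwise (· < ·)) (h : L.find? p = some j) :
    j ∈ L ∧ p j = true ∧ ∀ j' ∈ L, p j' = true → j ≤ j' := by
  rw [List.find?_eq_some_iff_append] at h
  obtain ⟨hp, l1, l2, rfl, hfail⟩ := h
  refine ⟨by simp, hp, ?_⟩
  intro j' hj' hpj'
  rcases List.mem_append.1 hj' with h1 | h2
  · have := hfail j' h1
    rw [hpj'] at this
    cases this
  · rcases List.mem_cons.1 h2 with rfl | h2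
    · exact le_refl _
    · have := (List.pairwise_append.1 hL).2.1
      exact le_of_lt ((List.pairwise_cons.1 ((List.pairwise_append.1 hL).2.1)).1 j' h2)

lemma pvFind_eq_some_of_min (L : List Int) (p : Int → Bool) (j : Int)
    (hL : L.Pairwise (· < ·)) (hmem : j ∈ L) (hp : p j = true)
    (hmin : ∀ j' ∈ L, p j' = true → j ≤ j') :
    L.find? p = some j := by
  induction L with
  | nil => simp at hmem
  | cons a tl ih =>
    rw [List.pairwise_cons] at hL
    rcases List.mem_cons.1 hmem with rfl | hm
    · rw [List.find?_cons, hp]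
    · have haj : a < j := hL.1 j hm
      have hpa : p a = false := by
        cases hpa : p a with
        | false => rfl
        | true => exact absurd (hmin a List.mem_cons_self hpa) (by omega)
      rw [List.find?_cons, hpa]
      exact ih hL.2 hm (fun j' hj' => hmin j' (List.mem_cons_of_mem _ hj'))

lemma pvContains_add (s : PySem.Set Int) (x y : Int) :
    PySem.Set.contains (PySem.Set.add s x) y = (PySem.Set.contains s y || y == x) := by
  rw [Bool.eq_iff_iff]
  unfold PySem.Set.add
  split_ifs with h
  · simp only [PySem.Set.contains, List.contains_iff_mem, Bool.or_eq_true, beq_iff_eq] at *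
    constructor
    · exact Or.inl
    · rintro (hy | rfl)
      · exact hy
      · exact h
  · simp [PySem.Set.contains, beq_iff_eq]

lemma pvContains_update_pair (u : PySem.Set Int) (i j x : Int) :
    PySem.Set.contains (PySem.Set.update u [i, j]) x
      = (PySem.Set.contains u x || x == i || x == j) := by
  have h : PySem.Set.update u [i, j] = PySem.Set.add (PySem.Set.add u i) j := rfl
  rw [h, pvContains_add, pvContains_add]

lemma pvLookup_isSome (l : List (String × Bool)) (k : String) (h : k ∈ l.map Prod.fst) :
    ∃ v, l.lookup k = some v := by
  induction l with
  | nil => simp at h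
  | cons a tl ih =>
    rw [List.map_cons, List.mem_cons] at h
    by_cases hk : a.1 = k
    · exact ⟨a.2, by simp [List.lookup, hk]⟩
    · have h' : k ∈ tl.map Prod.fst := by
        rcases h with h | h
        · exact absurd h.symm hk
        · exact h
      have hb : (k == a.1) = false := by
        rw [beq_eq_false_iff_ne]
        exact fun he => hk he.symm
      obtain ⟨v, hv⟩ := ih h'
      refine ⟨v, ?_⟩
      simp only [List.lookup, hb, hv]

lemma pvLookup_eq (l : List (String × Bool)) (h : (l.map Prod.fst).Nodup)
    {kv : String × Bool} (hm : kv ∈ l) : l.lookup kv.1 = some kv.2 := by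
  induction l with
  | nil => simp at hm
  | cons a tl ih =>
    rw [List.map_cons, List.nodup_cons] at h
    rcases List.mem_cons.1 hm with rfl | hm'
    · simp [List.lookup]
    · have hne : a.1 ≠ kv.1 := by
        intro he
        exact h.1 (he ▸ List.mem_map_of_mem hm')
      have hb : (kv.1 == a.1) = false := by
        rw [beq_eq_false_iff_ne]
        exact fun he => hne he.symm
      simp only [List.lookup, hb]
      exact ih h.2 hm'

lemma pvMem_of_lookup (l : List (String × Bool)) (k : String) (v : Bool)
    (h : l.lookup k = some v) : (k, v) ∈ l := by
  induction l with
  | nil => simp [List.lookup] at h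
  | cons a tl ih =>
    by_cases hk : (k == a.1) = true
    · simp only [List.lookup, hk] at h
      have : a = (k, v) := by
        obtain ⟨a1, a2⟩ := a
        simp at hk h
        simp [hk, h]
      exact this ▸ List.mem_cons_self
    · have hb : (k == a.1) = false := by
        cases hb : (k == a.1) with
        | false => rfl
        | true => exact absurd hb hk
      simp only [List.lookup, hb] at h
      exact List.mem_cons_of_mem _ (ih h)

lemma pvKeysEqA_iff (d1 d2 : List (String × Bool)) :
    pvAKeysEq d1 d2 = true ↔
      ((∀ k ∈ d1.map Prod.fst, k ∈ d2.map Prod.fst) ∧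
       (∀ k ∈ d2.map Prod.fst, k ∈ d1.map Prod.fst)) := by
  unfold pvAKeysEq PySem.Set.equal
  rw [Bool.and_eq_true, PySem.Set.issubset_iff, PySem.Set.issubset_iff]
  constructor
  · intro ⟨ha, hb⟩
    exact ⟨fun k hk => (PySem.Set.mem_ofList _ _).1 (ha k ((PySem.Set.mem_ofList _ _).2 hk)),
           fun k hk => (PySem.Set.mem_ofList _ _).1 (hb k ((PySem.Set.mem_ofList _ _).2 hk))⟩
  · intro ⟨ha, hb⟩
    exact ⟨fun k hk => (PySem.Set.mem_ofList _ _).2 (ha k ((PySem.Set.mem_ofList _ _).1 hk)),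
           fun k hk => (PySem.Set.mem_ofList _ _).2 (hb k ((PySem.Set.mem_ofList _ _).1 hk))⟩

lemma pvAInner_eq_find (d1 : List (String × Bool)) (u : PySem.Set Int)
    (es : List (Int × List (String × Bool))) :
    pvAInner d1 u es
      = (es.find? (fun p => !PySem.Set.contains u p.1
            && (pvAKeysEq d1 p.2 && (pvADiffering d1 p.2).length == 1))).map
          (fun p => (p.1, d1.filter (fun kv => kv.1 != (pvADiffering d1 p.2).headD ""))) := by
  induction es with
  | nil => rfl
  | cons p rest ih =>
    obtain ⟨j, d2⟩ := p
    cases hu : PySem.Set.contains u j with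
    | true =>
      have hA : pvAInner d1 u ((j, d2) :: rest) = pvAInner d1 u rest := by
        simp only [pvAInner]
        rw [hu, if_pos rfl]
      rw [hA, ih, List.find?_cons_of_neg (h := by
        show ¬ (!PySem.Set.contains u (j, d2).1 && _) = true
        rw [show PySem.Set.contains (α := Int) u (j, d2).1 = true from hu]
        simp)]
    | false =>
      cases hk : pvAKeysEq d1 d2 with
      | false =>
        have hA : pvAInner d1 u ((j, d2) :: rest) = pvAInner d1 u rest := by
          simp only [pvAInner]
          rw [hu, if_neg Bool.false_ne_true, hk, if_pos rfl]
        rw [hA, ih, List.find?_cons_of_neg (h := by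
          show ¬ (!PySem.Set.contains u (j, d2).1 && (pvAKeysEq d1 (j, d2).2 && _)) = true
          rw [show PySem.Set.contains (α := Int) u (j, d2).1 = false from hu,
              show pvAKeysEq d1 (j, d2).2 = false from hk]
          simp)]
      | true =>
        cases hl : ((pvADiffering d1 d2).length == 1) with
        | true =>
          have hA : pvAInner d1 u ((j, d2) :: rest)
              = some (j, d1.filter (fun kv => kv.1 != (pvADiffering d1 d2).headD "")) := by
            simp only [pvAInner]
            rw [hu, if_neg Bool.false_ne_true, hk, if_neg (by decide), hl, if_pos rfl]
          rw [hA, List.find?_cons_of_pos (h := by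
            show (!PySem.Set.contains u (j, d2).1 && (pvAKeysEq d1 (j, d2).2
                && ((pvADiffering d1 (j, d2).2).length == 1))) = true
            rw [show PySem.Set.contains (α := Int) u (j, d2).1 = false from hu,
                show pvAKeysEq d1 (j, d2).2 = true from hk,
                show ((pvADiffering d1 (j, d2).2).length == 1) = true from hl]
            rfl)]
          rfl
        | false =>
          have hA : pvAInner d1 u ((j, d2) :: rest) = pvAInner d1 u rest := by
            simp only [pvAInner]
            rw [hu, if_neg Bool.false_ne_true, hk, if_neg (by decide), hl,
                if_neg Bool.false_ne_true]
          rw [hA, ih, List.find?_cons_of_neg (h := by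
            show ¬ (!PySem.Set.contains u (j, d2).1 && (pvAKeysEq d1 (j, d2).2
                && ((pvADiffering d1 (j, d2).2).length == 1))) = true
            rw [show ((pvADiffering d1 (j, d2).2).length == 1) = false from hl]
            simp)]

-- the body of pvBBest's fold, with the candidate search abstracted

def pvStep (cand : String × Bool → Option Int) (best : Option (Int × String)) (kv : String × Bool) :
    Option (Int × String) :=
  match cand kv with
  | none => best
  | some j =>
    match best with
    | none => some (j, kv.1)
    | some q => if j < q.1 then some (j, kv.1) else some q

lemma pvFold_none (cand : String × Bool → Option Int) (l : List (String × Bool))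
    (h : ∀ kv ∈ l, cand kv = none) (acc : Option (Int × String)) :
    l.foldl (pvStep cand) acc = acc := by
  induction l generalizing acc with
  | nil => rfl
  | cons a tl ih =>
    rw [List.foldl_cons]
    have ha : pvStep cand acc a = acc := by
      unfold pvStep
      rw [h a List.mem_cons_self]
    rw [ha]
    exact ih (fun kv hkv => h kv (List.mem_cons_of_mem _ hkv)) acc

lemma pvFold_stay (cand : String × Bool → Option Int) (l : List (String × Bool))
    (jm : Int) (km : String)
    (hge : ∀ kv ∈ l, ∀ j, cand kv = some j → jm ≤ j) :
    l.foldl (pvStep cand) (some (jm, km)) = some (jm, km) := by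
  induction l with
  | nil => rfl
  | cons a tl ih =>
    rw [List.foldl_cons]
    have ha : pvStep cand (some (jm, km)) a = some (jm, km) := by
      unfold pvStep
      cases hc : cand a with
      | none => rfl
      | some j =>
        have hnl : ¬ j < jm := not_lt.2 (hge a List.mem_cons_self j hc)
        show (if j < jm then some (j, a.1) else some (jm, km)) = some (jm, km)
        rw [if_neg hnl]
    rw [ha]
    exact ih (fun kv hkv => hge kv (List.mem_cons_of_mem _ hkv))

lemma pvFold_some_acc (cand : String × Bool → Option Int) (l : List (String × Bool))
    (jm : Int) (km : String)
    (hex : ∃ vm, (km, vm) ∈ l ∧ cand (km, vm) = some jm)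
    (hge : ∀ kv ∈ l, ∀ j, cand kv = some j → jm ≤ j ∧ (j = jm → kv.1 = km))
    (q : Int × String) (hq : jm < q.1) :
    l.foldl (pvStep cand) (some q) = some (jm, km) := by
  induction l generalizing q with
  | nil =>
    obtain ⟨vm, hm, _⟩ := hex
    simp at hm
  | cons a tl ih =>
    rw [List.foldl_cons]
    have hge' : ∀ kv ∈ tl, ∀ j, cand kv = some j → jm ≤ j ∧ (j = jm → kv.1 = km) :=
      fun kv hkv => hge kv (List.mem_cons_of_mem _ hkv)
    cases hc : cand a with
    | none =>
      have ha : pvStep cand (some q) a = some q := by unfold pvStep; rw [hc]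
      rw [ha]
      obtain ⟨vm, hm, hcm⟩ := hex
      rcases List.mem_cons.1 hm with he | hm'
      · rw [he] at hcm
        rw [hcm] at hc
        cases hc
      · exact ih ⟨vm, hm', hcm⟩ hge' q hq
    | some j =>
      obtain ⟨hje, hjk⟩ := hge a List.mem_cons_self j hc
      by_cases hjm : j = jm
      · have hk : a.1 = km := hjk hjm
        have ha : pvStep cand (some q) a = some (jm, km) := by
          unfold pvStep
          rw [hc]
          show (if j < q.1 then some (j, a.1) else some q) = some (jm, km)
          rw [if_pos (by omega), hjm, hk]
        rw [ha]
        exact pvFold_stay cand tl jm km (fun kv hkv j' hc' => (hge' kv hkv j' hc').1)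
      · have hjgt : jm < j := lt_of_le_of_ne hje (fun h => hjm h.symm)
        have hwit : ∃ vm, (km, vm) ∈ tl ∧ cand (km, vm) = some jm := by
          obtain ⟨vm, hm, hcm⟩ := hex
          rcases List.mem_cons.1 hm with he | hm'
          · rw [he] at hcm
            rw [hcm] at hc
            exact absurd (Option.some_inj.1 hc).symm hjm
          · exact ⟨vm, hm', hcm⟩
        by_cases hlt : j < q.1
        · have ha : pvStep cand (some q) a = some (j, a.1) := by
            unfold pvStep
            rw [hc]
            show (if j < q.1 then some (j, a.1) else some q) = some (j, a.1)
            rw [if_pos hlt]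
          rw [ha]
          exact ih hwit hge' (j, a.1) hjgt
        · have ha : pvStep cand (some q) a = some q := by
            unfold pvStep
            rw [hc]
            show (if j < q.1 then some (j, a.1) else some q) = some q
            rw [if_neg hlt]
          rw [ha]
          exact ih hwit hge' q hq

lemma pvFold_some (cand : String × Bool → Option Int) (l : List (String × Bool))
    (jm : Int) (km : String)
    (hex : ∃ vm, (km, vm) ∈ l ∧ cand (km, vm) = some jm)
    (hge : ∀ kv ∈ l, ∀ j, cand kv = some j → jm ≤ j ∧ (j = jm → kv.1 = km)) :
    l.foldl (pvStep cand) none = some (jm, km) := by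
  induction l with
  | nil =>
    obtain ⟨vm, hm, _⟩ := hex
    simp at hm
  | cons a tl ih =>
    rw [List.foldl_cons]
    have hge' : ∀ kv ∈ tl, ∀ j, cand kv = some j → jm ≤ j ∧ (j = jm → kv.1 = km) :=
      fun kv hkv => hge kv (List.mem_cons_of_mem _ hkv)
    cases hc : cand a with
    | none =>
      have ha : pvStep cand none a = none := by unfold pvStep; rw [hc]
      rw [ha]
      obtain ⟨vm, hm, hcm⟩ := hex
      rcases List.mem_cons.1 hm with he | hm'
      · rw [he] at hcm
        rw [hcm] at hc
        cases hc
      · exact ih ⟨vm, hm', hcm⟩ hge'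
    | some j =>
      obtain ⟨hje, hjk⟩ := hge a List.mem_cons_self j hc
      have ha : pvStep cand none a = some (j, a.1) := by unfold pvStep; rw [hc]
      rw [ha]
      by_cases hjm : j = jm
      · rw [hjm, hjk hjm]
        exact pvFold_stay cand tl jm km (fun kv hkv j' hc' => (hge' kv hkv j' hc').1)
      · have hjgt : jm < j := lt_of_le_of_ne hje (fun h => hjm h.symm)
        have hwit : ∃ vm, (km, vm) ∈ tl ∧ cand (km, vm) = some jm := by
          obtain ⟨vm, hm, hcm⟩ := hex
          rcases List.mem_cons.1 hm with he | hm'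
          · rw [he] at hcm
            rw [hcm] at hc
            exact absurd (Option.some_inj.1 hc).symm hjm
          · exact ⟨vm, hm', hcm⟩
        exact pvFold_some_acc cand tl jm km hwit hge' (j, a.1) hjgt

def pvSortRest (d : List (String × Bool)) (k : String) : List (String × Bool) :=
  (pvBSortedItems d).filter (fun kv => kv.1 != k)

lemma pvSortRest_perm (d : List (String × Bool)) (k : String) :
    (pvSortRest d k).Perm (d.filter (fun kv => kv.1 != k)) :=
  (PySem.List.sorted_perm d (fun kv => kv.1) false).filter _

lemma pvSortRest_pairwise (d : List (String × Bool)) (k : String)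
    (h : (d.map Prod.fst).Nodup) :
    (pvSortRest d k).Pairwise (fun a b => a.1 < b.1) := by
  have hle : (pvBSortedItems d).Pairwise (fun a b : String × Bool => a.1 ≤ b.1) :=
    PySem.List.sorted_pairwise d (fun kv => kv.1)
  have hnd : ((pvBSortedItems d).map Prod.fst).Nodup := by
    have hperm : ((pvBSortedItems d).map Prod.fst).Perm (d.map Prod.fst) :=
      (PySem.List.sorted_perm d (fun kv => kv.1) false).map _
    exact hperm.nodup_iff.2 h
  have hne : (pvBSortedItems d).Pairwise (fun a b : String × Bool => a.1 ≠ b.1) :=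
    List.pairwise_map.1 hnd
  have hlt : (pvBSortedItems d).Pairwise (fun a b : String × Bool => a.1 < b.1) :=
    (hle.and hne).imp (fun h => lt_of_le_of_ne h.1 h.2)
  exact hlt.filter _

lemma pvEq_of_perm_lt (X Y : List (String × Bool)) (hp : X.Perm Y)
    (hX : X.Pairwise (fun a b => a.1 < b.1)) (hY : Y.Pairwise (fun a b => a.1 < b.1)) :
    X = Y := by
  have e1 : PySem.List.sorted X (fun kv => kv.1) false = X :=
    PySem.List.sorted_eq_of_perm_of_pairwise_lt X X _ (List.Perm.refl X) hX
  have e2 : PySem.List.sorted X (fun kv => kv.1) false = Y :=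
    PySem.List.sorted_eq_of_perm_of_pairwise_lt X Y _ hp.symm hY
  rw [← e1, e2]

lemma pvFilter_eq_singleton (l : List String) (hnd : l.Nodup) (p : String → Bool) (k : String)
    (hk : k ∈ l) (hiff : ∀ x ∈ l, (p x = true ↔ x = k)) : l.filter p = [k] := by
  induction l with
  | nil => simp at hk
  | cons a tl ih =>
    rw [List.nodup_cons] at hnd
    rw [List.filter_cons]
    rcases List.mem_cons.1 hk with rfl | hm
    · rw [if_pos ((hiff k List.mem_cons_self).2 rfl)]
      have : tl.filter p = [] := by
        rw [List.filter_eq_nil_iff]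
        intro x hx hpx
        exact hnd.1 (((hiff x (List.mem_cons_of_mem _ hx)).1 hpx) ▸ hx)
      rw [this]
    · have hak : a ≠ k := fun he => hnd.1 (he ▸ hm)
      rw [if_neg (by
        intro hpa
        exact hak ((hiff a List.mem_cons_self).1 hpa))]
      exact ih hnd.2 hm (fun x hx => hiff x (List.mem_cons_of_mem _ hx))

lemma pvPairNodup (d : List (String × Bool)) (h : (d.map Prod.fst).Nodup) (p : String × Bool → Bool) :
    (d.filter p).Nodup := by
  have : ((d.filter p).map Prod.fst).Nodup :=
    h.sublist (List.Sublist.map _ List.filter_sublist)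
  exact this.of_map _

lemma pvPerm_of_mem_iff (X Y : List (String × Bool)) (hX : X.Nodup) (hY : Y.Nodup)
    (h : ∀ kv : String × Bool, kv ∈ X ↔ kv ∈ Y) : X.Perm Y := by
  apply List.perm_of_nodup_nodup_toFinset_eq hX hY
  ext kv
  simp only [List.mem_toFinset]
  exact h kv

lemma pvSig_mem_iff (d1 d2 : List (String × Bool))
    (h1 : (d1.map Prod.fst).Nodup) (h2 : (d2.map Prod.fst).Nodup)
    (k : String) (v1 : Bool) (hkv : (k, v1) ∈ d1) :
    pvBSigOf (pvBSortedItems d1) k (!v1) ∈ pvSigList d2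
      ↔ (pvAKeysEq d1 d2 = true ∧ pvADiffering d1 d2 = [k]) := by
  have hlk1 : d1.lookup k = some v1 := pvLookup_eq d1 h1 hkv
  constructor
  · intro hmem
    obtain ⟨⟨k2, v2⟩, hkv2, heq⟩ := List.mem_map.1 hmem
    simp only [pvBSigOf, Prod.mk.injEq] at heq
    obtain ⟨hk2, hrest0, hv2⟩ := heq
    cases hk2
    cases hv2
    have hrest : pvSortRest d2 k = pvSortRest d1 k := hrest0
    have hmem2 : (k, !v1) ∈ d2 := hkv2
    have hXY : (d1.filter (fun kv => kv.1 != k)).Perm (d2.filter (fun kv => kv.1 != k)) := by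
      refine (pvSortRest_perm d1 k).symm.trans ?_
      rw [show pvSortRest d1 k = pvSortRest d2 k from hrest.symm]
      exact pvSortRest_perm d2 k
    have hmem_iff : ∀ kv : String × Bool, kv ∈ d1.filter (fun kv => kv.1 != k)
        ↔ kv ∈ d2.filter (fun kv => kv.1 != k) := fun kv => hXY.mem_iff
    have hkeys : pvAKeysEq d1 d2 = true := by
      rw [pvKeysEqA_iff]
      constructor
      · intro k2 hk2m
        obtain ⟨kv, hkvm, hfst⟩ := List.mem_map.1 hk2m
        by_cases hek : k2 = k
        · exact hek ▸ List.mem_map_of_mem hmem2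
        · have : kv ∈ d1.filter (fun kv => kv.1 != k) :=
            List.mem_filter.2 ⟨hkvm, by rw [bne_iff_ne]; rw [hfst]; exact hek⟩
          have := (hmem_iff kv).1 this
          exact hfst ▸ List.mem_map_of_mem (List.mem_filter.1 this).1
      · intro k2 hk2m
        obtain ⟨kv, hkvm, hfst⟩ := List.mem_map.1 hk2m
        by_cases hek : k2 = k
        · exact hek ▸ List.mem_map_of_mem hkv
        · have : kv ∈ d2.filter (fun kv => kv.1 != k) :=
            List.mem_filter.2 ⟨hkvm, by rw [bne_iff_ne]; rw [hfst]; exact hek⟩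
          have := (hmem_iff kv).2 this
          exact hfst ▸ List.mem_map_of_mem (List.mem_filter.1 this).1
    refine ⟨hkeys, ?_⟩
    unfold pvADiffering
    apply pvFilter_eq_singleton _ h1 _ k (List.mem_map_of_mem hkv)
    intro x hx
    by_cases hek : x = k
    · subst hek
      rw [hlk1, pvLookup_eq d2 h2 hmem2]
      simp only [Option.getD_some]
      constructor
      · intro _
        trivial
      · intro _
        cases v1 <;> rfl
    · obtain ⟨kv, hkvm, hfst⟩ := List.mem_map.1 hx
      have hin1 : kv ∈ d1.filter (fun kv => kv.1 != k) :=
        List.mem_filter.2 ⟨hkvm, by rw [bne_iff_ne]; rw [hfst]; exact hek⟩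
      have hin2 : kv ∈ d2 := (List.mem_filter.1 ((hmem_iff kv).1 hin1)).1
      have hl1 : d1.lookup x = some kv.2 := hfst ▸ pvLookup_eq d1 h1 hkvm
      have hl2 : d2.lookup x = some kv.2 := hfst ▸ pvLookup_eq d2 h2 hin2
      rw [hl1, hl2]
      simp [hek]
  · rintro ⟨hkeys, hdiff⟩
    rw [pvKeysEqA_iff] at hkeys
    have hk2m : k ∈ d2.map Prod.fst := hkeys.1 k (List.mem_map_of_mem hkv)
    obtain ⟨w, hlk2⟩ := pvLookup_isSome d2 k hk2m
    have hpk : ((d1.lookup k).getD false != (d2.lookup k).getD false) = true := by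
      have : k ∈ pvADiffering d1 d2 := by rw [hdiff]; exact List.mem_singleton.2 rfl
      exact (List.mem_filter.1 this).2
    have hw : w = !v1 := by
      rw [hlk1, hlk2] at hpk
      simp only [Option.getD_some] at hpk
      cases v1 <;> cases w <;> simp_all
    have hmem2 : (k, !v1) ∈ d2 := pvMem_of_lookup d2 k (!v1) (hw ▸ hlk2)
    -- any key other than k has equal lookups
    have hagree : ∀ k2, k2 ≠ k → k2 ∈ d1.map Prod.fst →
        ∀ x, ((k2, x) ∈ d1 ↔ (k2, x) ∈ d2) := by
      intro k2 hne hk2m1 x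
      have hpk2 : ((d1.lookup k2).getD false != (d2.lookup k2).getD false) = false := by
        cases hp : ((d1.lookup k2).getD false != (d2.lookup k2).getD false) with
        | false => rfl
        | true =>
          have : k2 ∈ pvADiffering d1 d2 := List.mem_filter.2 ⟨hk2m1, hp⟩
          rw [hdiff] at this
          exact absurd (List.mem_singleton.1 this) hne
      obtain ⟨y1, hy1⟩ := pvLookup_isSome d1 k2 hk2m1
      obtain ⟨y2, hy2⟩ := pvLookup_isSome d2 k2 (hkeys.1 k2 hk2m1)
      have hy12 : y1 = y2 := by
        rw [hy1, hy2] at hpk2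
        simpa using hpk2
      constructor
      · intro hm
        have : y1 = x := Option.some_inj.1 ((pvLookup_eq d1 h1 hm).symm.trans hy1).symm
        exact pvMem_of_lookup d2 k2 x (by rw [hy2, ← hy12, this])
      · intro hm
        have : y2 = x := Option.some_inj.1 ((pvLookup_eq d2 h2 hm).symm.trans hy2).symm
        exact pvMem_of_lookup d1 k2 x (by rw [hy1, hy12, this])
    have hmem_iff : ∀ kv : String × Bool, kv ∈ d1.filter (fun kv => kv.1 != k)
        ↔ kv ∈ d2.filter (fun kv => kv.1 != k) := by
      intro kv
      constructor
      · intro hm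
        obtain ⟨hm1, hne⟩ := List.mem_filter.1 hm
        rw [bne_iff_ne] at hne
        refine List.mem_filter.2 ⟨?_, by rw [bne_iff_ne]; exact hne⟩
        exact (hagree kv.1 hne (List.mem_map_of_mem hm1) kv.2).1 hm1
      · intro hm
        obtain ⟨hm1, hne⟩ := List.mem_filter.1 hm
        rw [bne_iff_ne] at hne
        have hk2m1 : kv.1 ∈ d1.map Prod.fst := hkeys.2 kv.1 (List.mem_map_of_mem hm1)
        refine List.mem_filter.2 ⟨?_, by rw [bne_iff_ne]; exact hne⟩
        exact (hagree kv.1 hne hk2m1 kv.2).2 hm1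
    have hXY : (d1.filter (fun kv => kv.1 != k)).Perm (d2.filter (fun kv => kv.1 != k)) :=
      pvPerm_of_mem_iff _ _ (pvPairNodup d1 h1 _) (pvPairNodup d2 h2 _) hmem_iff
    have hrest : pvSortRest d1 k = pvSortRest d2 k := by
      apply pvEq_of_perm_lt _ _ _ (pvSortRest_pairwise d1 k h1) (pvSortRest_pairwise d2 k h2)
      exact (pvSortRest_perm d1 k).trans (hXY.trans (pvSortRest_perm d2 k).symm)
    have : pvBSigOf (pvBSortedItems d1) k (!v1) = pvBSigOf (pvBSortedItems d2) k (!v1) := by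
      unfold pvBSigOf
      rw [show (pvBSortedItems d1).filter (fun kv => kv.1 != k)
            = (pvBSortedItems d2).filter (fun kv => kv.1 != k) from hrest]
    rw [this]
    exact List.mem_map_of_mem hmem2

lemma pvLen_one (l : List String) (h : (l.length == 1) = true) : l = [l.headD ""] := by
  match l with
  | [x] => rfl
  | [] => simp at h
  | x :: y :: tl => simp at h

lemma pvMem_enum_suffix (c : List (List (String × Bool))) (m : Nat)
    (p : Int × List (String × Bool)) :
    p ∈ PySem.List.enumerate (c.drop m) (m : Int)
      ↔ ∃ t : Nat, t < c.length ∧ m ≤ t ∧ p = ((t : Int), c.getD t []) := by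
  rw [PySem.List.mem_enumerate_iff]
  constructor
  · rintro ⟨k, hk, rfl⟩
    rw [List.length_drop] at hk
    refine ⟨m + k, by omega, by omega, ?_⟩
    have hg : (c.drop m)[k] = c.getD (m + k) [] := by
      rw [List.getElem_drop, List.getD_eq_getElem c [] (by omega)]
    rw [hg, show ((m : Int) + k) = ((m + k : Nat) : Int) by push_cast; ring]
  · rintro ⟨t, ht, hmt, rfl⟩
    refine ⟨t - m, by rw [List.length_drop]; omega, ?_⟩
    have hg : (c.drop m)[t - m]'(by rw [List.length_drop]; omega) = c.getD t [] := by
      rw [List.getElem_drop, List.getD_eq_getElem c [] (by omega)]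
      congr 1
      omega
    rw [hg, show ((m : Int) + (t - m : Nat)) = (t : Int) by push_cast [hmt]; ring]

lemma pvFind_min_some_pair (L : List (Int × List (String × Bool)))
    (p : Int × List (String × Bool) → Bool) (x : Int × List (String × Bool))
    (hL : L.Pairwise (fun a b => a.1 < b.1)) (h : L.find? p = some x) :
    x ∈ L ∧ p x = true ∧ ∀ y ∈ L, p y = true → x.1 ≤ y.1 := by
  rw [List.find?_eq_some_iff_append] at h
  obtain ⟨hp, l1, l2, rfl, hfail⟩ := h
  refine ⟨by simp, hp, ?_⟩
  intro y hy hpy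
  rcases List.mem_append.1 hy with h1 | h2
  · have := hfail y h1
    rw [hpy] at this
    cases this
  · rcases List.mem_cons.1 h2 with rfl | h2
    · exact le_refl _
    · exact le_of_lt ((List.pairwise_cons.1 ((List.pairwise_append.1 hL).2.1)).1 y h2)

lemma pvBucket_mem (c : List (List (String × Bool)))
    (hPre : ∀ d ∈ c, (d.map Prod.fst).Nodup)
    (sig : String × List (String × Bool) × Bool) (j : Int) :
    j ∈ (pvBBuckets c).getD sig []
      ↔ ∃ t : Nat, t < c.length ∧ j = (t : Int) ∧ sig ∈ pvSigList (c.getD t []) := by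
  rw [pvBuckets_char c (fun d hd => pvSigList_nodup d (hPre d hd)) sig]
  rw [List.mem_map]
  constructor
  · rintro ⟨p, hp, rfl⟩
    obtain ⟨hpe, hsig⟩ := List.mem_filter.1 hp
    rw [show PySem.List.enumerate c = PySem.List.enumerate (c.drop 0) ((0 : Nat) : Int) by
          rw [List.drop_zero]; rfl] at hpe
    obtain ⟨t, ht, -, rfl⟩ := (pvMem_enum_suffix c 0 p).1 hpe
    exact ⟨t, ht, rfl, by simpa using hsig⟩
  · rintro ⟨t, ht, rfl, hsig⟩
    refine ⟨((t : Int), c.getD t []), List.mem_filter.2 ⟨?_, by simpa using hsig⟩, rfl⟩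
    rw [show PySem.List.enumerate c = PySem.List.enumerate (c.drop 0) ((0 : Nat) : Int) by
          rw [List.drop_zero]; rfl]
    exact (pvMem_enum_suffix c 0 _).2 ⟨t, ht, Nat.zero_le t, rfl⟩

lemma pvBucket_pairwise (c : List (List (String × Bool)))
    (hPre : ∀ d ∈ c, (d.map Prod.fst).Nodup)
    (sig : String × List (String × Bool) × Bool) :
    ((pvBBuckets c).getD sig []).Pairwise (· < ·) := by
  rw [pvBuckets_char c (fun d hd => pvSigList_nodup d (hPre d hd)) sig]
  exact List.pairwise_map.2 ((PySem.List.pairwise_lt_enumerate c 0).filter _)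

lemma pvSearch_eq (c : List (List (String × Bool)))
    (hPre : ∀ d ∈ c, (d.map Prod.fst).Nodup)
    (a : Nat) (ha : a < c.length)
    (u : PySem.Set Int) (w : List Bool)
    (hw : ∀ t : Nat, t < c.length → a < t →
        PySem.Set.contains u (t : Int) = w.getD t false) :
    pvAInner (c.getD a []) u (PySem.List.enumerate (c.drop (a + 1)) ((a : Int) + 1))
      = (pvBBest (pvBBuckets c) w (a : Int) (c.getD a [])).map
          (fun q => (q.1, (c.getD a []).filter (fun kv => kv.1 != q.2))) := by
  set d1 := c.getD a [] with hd1def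
  have hd1mem : d1 ∈ c := by
    rw [hd1def, List.getD_eq_getElem c [] ha]
    exact List.getElem_mem _
  have h1 : (d1.map Prod.fst).Nodup := hPre d1 hd1mem
  -- candidate function of B's inner loop
  set cand : String × Bool → Option Int := fun kv =>
    ((pvBBuckets c).getD (pvBSigOf (pvBSortedItems d1) kv.1 (!kv.2)) []).find?
      (fun j => decide ((a : Int) < j) && !(PySem.List.pyGetD w j false)) with hcand
  have hB : pvBBest (pvBBuckets c) w (a : Int) d1 = d1.foldl (pvStep cand) none := rfl
  -- characterize a returned candidate
  have hcand_some : ∀ kv ∈ d1, ∀ j, cand kv = some j →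
      ∃ t : Nat, t < c.length ∧ j = (t : Int) ∧ a < t ∧ w.getD t false = false ∧
        pvAKeysEq d1 (c.getD t []) = true ∧ pvADiffering d1 (c.getD t []) = [kv.1] := by
    intro kv hkv j hj
    rw [hcand] at hj
    obtain ⟨hjmem, hjpred, -⟩ :=
      pvFind_min_some _ _ _ (pvBucket_pairwise c hPre _) hj
    obtain ⟨t, ht, rfl, hsig⟩ := (pvBucket_mem c hPre _ _).1 hjmem
    rw [Bool.and_eq_true] at hjpred
    have hat : a < t := by
      have := of_decide_eq_true hjpred.1
      exact_mod_cast this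
    have hwt : w.getD t false = false := by
      have := hjpred.2
      rw [PySem.List.pyGetD_natCast] at this
      simpa using this
    have hsig' := (pvSig_mem_iff d1 (c.getD t []) h1
      (hPre _ (by rw [List.getD_eq_getElem c [] ht]; exact List.getElem_mem _))
      kv.1 kv.2 hkv).1 hsig
    exact ⟨t, ht, rfl, hat, hwt, hsig'.1, hsig'.2⟩
  -- the suffix A scans, and its search predicate
  set es := PySem.List.enumerate (c.drop (a + 1)) ((a : Int) + 1) with hes
  have hesP : es.Pairwise (fun p q => p.1 < q.1) := PySem.List.pairwise_lt_enumerate _ _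
  have hesmem : ∀ p, p ∈ es ↔ ∃ t : Nat, t < c.length ∧ a + 1 ≤ t ∧
      p = ((t : Int), c.getD t []) := by
    intro p
    rw [hes, show ((a : Int) + 1) = ((a + 1 : Nat) : Int) by push_cast; ring]
    exact pvMem_enum_suffix c (a + 1) p
  rw [pvAInner_eq_find, hB]
  cases hf : es.find? (fun p => !PySem.Set.contains u p.1
      && (pvAKeysEq d1 p.2 && (pvADiffering d1 p.2).length == 1)) with
  | none =>
    rw [List.find?_eq_none] at hf
    have hnone : ∀ kv ∈ d1, cand kv = none := by
      intro kv hkv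
      cases hj : cand kv with
      | none => rfl
      | some j =>
        obtain ⟨t, ht, rfl, hat, hwt, hke, hdiff⟩ := hcand_some kv hkv j hj
        have hpm : ((t : Int), c.getD t []) ∈ es := (hesmem _).2 ⟨t, ht, by omega, rfl⟩
        have := hf _ hpm
        rw [Bool.not_eq_true, Bool.and_eq_false_iff] at this
        rcases this with hcu | hrest
        · rw [Bool.not_eq_false'] at hcu
          rw [hw t ht hat, hwt] at hcu
          cases hcu
        · rw [Bool.and_eq_false_iff] at hrest
          rcases hrest with hke' | hlen'
          · rw [hke] at hke'
            cases hke'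
          · rw [hdiff] at hlen'
            simp at hlen'
    rw [pvFold_none cand d1 hnone none]
    rfl
  | some p =>
    obtain ⟨hpmem, hppred, hpmin⟩ := pvFind_min_some_pair es _ p hesP hf
    obtain ⟨ts, hts, hats, hpeq⟩ := (hesmem p).1 hpmem
    rw [Bool.and_eq_true, Bool.and_eq_true] at hppred
    obtain ⟨hcu, hke, hlen⟩ := hppred
    have hp2 : p.2 = c.getD ts [] := by rw [hpeq]
    have hp1 : p.1 = (ts : Int) := by rw [hpeq]
    rw [hp2] at hke hlen
    -- the unique differing key
    have hdiff : pvADiffering d1 (c.getD ts []) = [(pvADiffering d1 (c.getD ts [])).headD ""] :=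
      pvLen_one _ hlen
    set ks := (pvADiffering d1 (c.getD ts [])).headD "" with hks
    have hkmem : ks ∈ d1.map Prod.fst := by
      have : ks ∈ pvADiffering d1 (c.getD ts []) := by
        rw [hdiff]
        exact List.mem_singleton.2 rfl
      exact (List.mem_filter.1 this).1
    obtain ⟨kvs, hkvs, hkfst⟩ := List.mem_map.1 hkmem
    have hts_nodup : ((c.getD ts []).map Prod.fst).Nodup :=
      hPre _ (by rw [List.getD_eq_getElem c [] hts]; exact List.getElem_mem _)
    have hwts : w.getD ts false = false := by
      rw [← hw ts hts (by omega)]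
      rw [hp1] at hcu
      rw [Bool.not_eq_true'] at hcu
      exact hcu
    -- any A-eligible matching index is at least ts
    have hPle : ∀ t' : Nat, t' < c.length → a < t' → w.getD t' false = false →
        pvAKeysEq d1 (c.getD t' []) = true →
        ((pvADiffering d1 (c.getD t' [])).length == 1) = true → ts ≤ t' := by
      intro t' ht' hat' hwt' hke' hlen'
      have hpm' : ((t' : Int), c.getD t' []) ∈ es := (hesmem _).2 ⟨t', ht', by omega, rfl⟩
      have hP' : (!PySem.Set.contains u ((t' : Int), c.getD t' []).1
          && (pvAKeysEq d1 ((t' : Int), c.getD t' []).2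
              && ((pvADiffering d1 ((t' : Int), c.getD t' []).2).length == 1))) = true := by
        show (!PySem.Set.contains u (t' : Int)
          && (pvAKeysEq d1 (c.getD t' [])
              && ((pvADiffering d1 (c.getD t' [])).length == 1))) = true
        rw [hw t' ht' hat', hwt', hke', hlen']
        rfl
      have h2 := hpmin _ hpm' hP'
      rw [hp1] at h2
      have h3 : (ts : Int) ≤ (t' : Int) := h2
      exact_mod_cast h3
    -- B's candidate at the key ks is exactly ts
    have hcand_ks : cand kvs = some ((ts : Int)) := by
      rw [hcand]
      apply pvFind_eq_some_of_min _ _ _ (pvBucket_pairwise c hPre _)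
      · rw [pvBucket_mem c hPre]
        refine ⟨ts, hts, rfl, ?_⟩
        rw [show pvBSigOf (pvBSortedItems d1) kvs.1 (!kvs.2)
              = pvBSigOf (pvBSortedItems d1) ks (!kvs.2) by rw [hkfst]]
        apply (pvSig_mem_iff d1 (c.getD ts []) h1 hts_nodup ks kvs.2 (hkfst ▸ hkvs)).2
        exact ⟨hke, hdiff.symm ▸ rfl⟩
      · rw [Bool.and_eq_true]
        refine ⟨decide_eq_true (by exact_mod_cast (by omega : a < ts)), ?_⟩
        rw [PySem.List.pyGetD_natCast, hwts]
        rfl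
      · intro j' hj' hpj'
        obtain ⟨t', ht', rfl, hsig'⟩ := (pvBucket_mem c hPre _ _).1 hj'
        rw [Bool.and_eq_true] at hpj'
        have hat' : a < t' := by
          have := of_decide_eq_true hpj'.1
          exact_mod_cast this
        have hwt' : w.getD t' false = false := by
          have := hpj'.2
          rw [PySem.List.pyGetD_natCast] at this
          simpa using this
        have hnd' : ((c.getD t' []).map Prod.fst).Nodup :=
          hPre _ (by rw [List.getD_eq_getElem c [] ht']; exact List.getElem_mem _)
        have hsig'' := by
          refine (pvSig_mem_iff d1 (c.getD t' []) h1 hnd' ks kvs.2 (hkfst ▸ hkvs)).1 ?_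
          rw [show pvBSigOf (pvBSortedItems d1) ks (!kvs.2)
                = pvBSigOf (pvBSortedItems d1) kvs.1 (!kvs.2) by rw [hkfst]]
          exact hsig'
        have := hPle t' ht' hat' hwt' hsig''.1 (by rw [hsig''.2]; rfl)
        exact_mod_cast this
    -- every candidate of B is at least ts, and ts only at the key ks
    have hge : ∀ kv ∈ d1, ∀ j, cand kv = some j →
        ((ts : Int) ≤ j ∧ (j = (ts : Int) → kv.1 = ks)) := by
      intro kv hkv j hj
      obtain ⟨t', ht', rfl, hat', hwt', hke', hdiff'⟩ := hcand_some kv hkv j hj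
      have hle : ts ≤ t' := hPle t' ht' hat' hwt' hke' (by rw [hdiff']; rfl)
      refine ⟨by exact_mod_cast hle, ?_⟩
      intro hjt
      have htt : t' = ts := by exact_mod_cast hjt
      rw [htt] at hdiff'
      have : [kv.1] = [ks] := by rw [← hdiff', hdiff]
      simpa using this
    have hex : ∃ vm, (ks, vm) ∈ d1 ∧ cand (ks, vm) = some ((ts : Int)) := by
      refine ⟨kvs.2, ?_, ?_⟩
      · rw [show (ks, kvs.2) = kvs from by rw [← hkfst]]
        exact hkvs
      · rw [show (ks, kvs.2) = kvs from by rw [← hkfst]]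
        exact hcand_ks
    rw [pvFold_some cand d1 ((ts : Int)) ks hex hge]
    rw [Option.map_some, Option.map_some]
    rw [hp1, hp2]

lemma pvFold_shape (cand : String × Bool → Option Int) (l : List (String × Bool))
    (acc : Option (Int × String)) (q : Int × String)
    (h : l.foldl (pvStep cand) acc = some q) :
    acc = some q ∨ ∃ kv ∈ l, cand kv = some q.1 := by
  induction l generalizing acc with
  | nil => exact Or.inl h
  | cons a tl ih =>
    rw [List.foldl_cons] at h
    rcases ih _ h with hacc | ⟨kv, hkv, hc⟩
    · unfold pvStep at hacc
      cases hc : cand a with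
      | none =>
        rw [hc] at hacc
        exact Or.inl hacc
      | some j =>
        rw [hc] at hacc
        cases acc with
        | none =>
          right
          refine ⟨a, List.mem_cons_self, ?_⟩
          have hq : ((j, a.1) : Int × String) = q := Option.some_inj.1 hacc
          rw [hc, ← hq]
        | some p =>
          by_cases hlt : j < p.1
          · right
            refine ⟨a, List.mem_cons_self, ?_⟩
            have hsq : (some (j, a.1) : Option (Int × String)) = some q := by
              rw [← hacc]
              show _ = if j < p.1 then some (j, a.1) else some p
              rw [if_pos hlt]
            have hq : ((j, a.1) : Int × String) = q := Option.some_inj.1 hsq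
            rw [hc, ← hq]
          · left
            rw [← hacc]
            show _ = if j < p.1 then some (j, a.1) else some p
            rw [if_neg hlt]
    · exact Or.inr ⟨kv, List.mem_cons_of_mem _ hkv, hc⟩

lemma pvBBest_some_shape (c : List (List (String × Bool)))
    (hPre : ∀ d ∈ c, (d.map Prod.fst).Nodup)
    (a : Nat) (w : List Bool) (d : List (String × Bool)) (j : Int) (k : String)
    (h : pvBBest (pvBBuckets c) w (a : Int) d = some (j, k)) :
    ∃ t : Nat, j = (t : Int) ∧ a < t ∧ t < c.length := by
  have h' : d.foldl (pvStep (fun kv =>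
      ((pvBBuckets c).getD (pvBSigOf (pvBSortedItems d) kv.1 (!kv.2)) []).find?
        (fun j => decide ((a : Int) < j) && !(PySem.List.pyGetD w j false)))) none
      = some (j, k) := h
  rcases pvFold_shape _ _ _ _ h' with hacc | ⟨kv, hkv, hc⟩
  · cases hacc
  · obtain ⟨hjmem, hjpred, -⟩ := pvFind_min_some _ _ _ (pvBucket_pairwise c hPre _) hc
    obtain ⟨t, ht, rfl, -⟩ := (pvBucket_mem c hPre _ _).1 hjmem
    rw [Bool.and_eq_true] at hjpred
    have hat : a < t := by
      have h1 := of_decide_eq_true hjpred.1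
      have h2 : (a : Int) < (t : Int) := h1
      exact_mod_cast h2
    exact ⟨t, rfl, hat, ht⟩

lemma pvOuter_eq (c : List (List (String × Bool)))
    (hPre : ∀ d ∈ c, (d.map Prod.fst).Nodup) (m : Nat) :
    ∀ (a : Nat), c.length - a = m →
    ∀ (u : PySem.Set Int) (w : List Bool) (acc : List (List (String × Bool))),
    w.length = c.length →
    (∀ t : Nat, t < c.length → a ≤ t → PySem.Set.contains u (t : Int) = w.getD t false) →
    pvAOuter (PySem.List.enumerate (c.drop a) (a : Int)) u acc
      = acc ++ pvBLoopF (pvBBuckets c) (PySem.List.enumerate (c.drop a) (a : Int)) w := by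
  induction m with
  | zero =>
    intro a hm u w acc hwlen hw
    have hnil : c.drop a = [] := List.drop_eq_nil_of_le (by omega)
    rw [hnil]
    show pvAOuter [] u acc = acc ++ pvBLoopF (pvBBuckets c) [] w
    rw [show pvBLoopF (pvBBuckets c) [] w = [] from rfl]
    simp [pvAOuter]
  | succ m ih =>
    intro a hm u w acc hwlen hw
    have ha : a < c.length := by omega
    have hdrop : c.drop a = c.getD a [] :: c.drop (a + 1) := by
      rw [List.getD_eq_getElem c [] ha]
      exact List.drop_eq_getElem_cons ha
    rw [hdrop, PySem.List.enumerate_cons]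
    have hcast : (a : Int) + 1 = ((a + 1 : Nat) : Int) := by push_cast; ring
    have hused : PySem.Set.contains u (a : Int) = w.getD a false := hw a ha (le_refl a)
    cases hu : w.getD a false with
    | true =>
      have hA : pvAOuter (((a : Int), c.getD a []) :: PySem.List.enumerate (c.drop (a + 1)) ((a : Int) + 1)) u acc
          = pvAOuter (PySem.List.enumerate (c.drop (a + 1)) ((a : Int) + 1)) u acc := by
        simp only [pvAOuter]
        rw [hused, hu, if_pos rfl]
      have hB : pvBLoopF (pvBBuckets c) (((a : Int), c.getD a []) :: PySem.List.enumerate (c.drop (a + 1)) ((a : Int) + 1)) w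
          = pvBLoopF (pvBBuckets c) (PySem.List.enumerate (c.drop (a + 1)) ((a : Int) + 1)) w := by
        simp only [pvBLoopF]
        rw [PySem.List.pyGetD_natCast, hu, if_pos rfl]
      rw [hA, hB, hcast]
      exact ih (a + 1) (by omega) u w acc hwlen (fun t ht hat => hw t ht (by omega))
    | false =>
      have hsearch := pvSearch_eq c hPre a ha u w (fun t ht hat => hw t ht (by omega))
      cases hbb : pvBBest (pvBBuckets c) w (a : Int) (c.getD a []) with
      | none =>
        have hA : pvAOuter (((a : Int), c.getD a []) :: PySem.List.enumerate (c.drop (a + 1)) ((a : Int) + 1)) u acc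
            = pvAOuter (PySem.List.enumerate (c.drop (a + 1)) ((a : Int) + 1)) u (acc ++ [c.getD a []]) := by
          simp only [pvAOuter]
          rw [hused, hu, if_neg Bool.false_ne_true]
          rw [hsearch, hbb]
          rfl
        have hB : pvBLoopF (pvBBuckets c) (((a : Int), c.getD a []) :: PySem.List.enumerate (c.drop (a + 1)) ((a : Int) + 1)) w
            = c.getD a [] :: pvBLoopF (pvBBuckets c) (PySem.List.enumerate (c.drop (a + 1)) ((a : Int) + 1)) w := by
          simp only [pvBLoopF]
          rw [PySem.List.pyGetD_natCast, hu, if_neg Bool.false_ne_true, hbb]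
        rw [hA, hB, hcast,
            ih (a + 1) (by omega) u w (acc ++ [c.getD a []]) hwlen
              (fun t ht hat => hw t ht (by omega))]
        simp
      | some q =>
        obtain ⟨j, k⟩ := q
        obtain ⟨ts, rfl, hats, hts⟩ := pvBBest_some_shape c hPre a w (c.getD a []) j k hbb
        have hA : pvAOuter (((a : Int), c.getD a []) :: PySem.List.enumerate (c.drop (a + 1)) ((a : Int) + 1)) u acc
            = pvAOuter (PySem.List.enumerate (c.drop (a + 1)) ((a : Int) + 1))
                (PySem.Set.update u [(a : Int), (ts : Int)])
                (acc ++ [(c.getD a []).filter (fun kv => kv.1 != k)]) := by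
          simp only [pvAOuter]
          rw [hused, hu, if_neg Bool.false_ne_true]
          rw [hsearch, hbb]
          rfl
        have hB : pvBLoopF (pvBBuckets c) (((a : Int), c.getD a []) :: PySem.List.enumerate (c.drop (a + 1)) ((a : Int) + 1)) w
            = (c.getD a []).filter (fun kv => kv.1 != k)
              :: pvBLoopF (pvBBuckets c) (PySem.List.enumerate (c.drop (a + 1)) ((a : Int) + 1))
                  (PySem.List.pySetD w (ts : Int) true) := by
          simp only [pvBLoopF]
          rw [PySem.List.pyGetD_natCast, hu, if_neg Bool.false_ne_true, hbb]
        have hwset : PySem.List.pySetD w (ts : Int) true = w.set ts true := by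
          rw [PySem.List.pySetD_natCast]
        have hw' : ∀ t : Nat, t < c.length → a + 1 ≤ t →
            PySem.Set.contains (PySem.Set.update u [(a : Int), (ts : Int)]) (t : Int)
              = (w.set ts true).getD t false := by
          intro t ht hat
          rw [pvContains_update_pair]
          have hta : ((t : Int) == (a : Int)) = false := by
            rw [beq_eq_false_iff_ne]
            intro he
            have : t = a := by exact_mod_cast he
            omega
          rw [hw t ht (by omega), hta, Bool.or_false]
          have hgetset : (w.set ts true).getD t false
              = if ts = t then true else w.getD t false := by
            rw [List.getD_eq_getElem?_getD, List.getElem?_set, List.getD_eq_getElem?_getD]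
            split_ifs with h1 h2
            · rfl
            · exact absurd (by omega : ts < w.length) h2
            · rfl
          rw [hgetset]
          by_cases hteq : t = ts
          · rw [if_pos hteq.symm]
            have : ((t : Int) == (ts : Int)) = true := by
              rw [beq_iff_eq]
              exact_mod_cast hteq
            rw [this, Bool.or_true]
          · rw [if_neg (fun he => hteq he.symm)]
            have : ((t : Int) == (ts : Int)) = false := by
              rw [beq_eq_false_iff_ne]
              intro he
              exact hteq (by exact_mod_cast he)
            rw [this, Bool.or_false]
        rw [hA, hB, hcast, hwset,
            ih (a + 1) (by omega) (PySem.Set.update u [(a : Int), (ts : Int)]) (w.set ts true)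
              (acc ++ [(c.getD a []).filter (fun kv => kv.1 != k)])
              (by rw [List.length_set]; exact hwlen) hw']
        simp

-- a bucket entry is dead for the scan at index i: already passed, or already used
def pvDead (i : Int) (w : List Bool) (j : Int) : Bool :=
  decide (j ≤ i) || PySem.List.pyGetD w j false

lemma pvElig_not_dead (i : Int) (w : List Bool) (j : Int) :
    (decide (i < j) && !(PySem.List.pyGetD w j false)) = !pvDead i w j := by
  unfold pvDead
  by_cases hij : j ≤ i
  · rw [decide_eq_true hij, decide_eq_false (by omega : ¬ i < j)]
    simp
  · rw [decide_eq_false hij, decide_eq_true (by omega : i < j)]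
    simp

lemma pvBAdvance_spec (lst : List Int) (i : Int) (w : List Bool) :
    ∀ (m p : Nat), lst.length - p = m → p ≤ lst.length →
    (p ≤ pvBAdvance lst i w p ∧ pvBAdvance lst i w p ≤ lst.length) ∧
    (∀ idx (h : idx < lst.length), p ≤ idx → idx < pvBAdvance lst i w p →
        pvDead i w lst[idx] = true) ∧
    (∀ h : pvBAdvance lst i w p < lst.length, pvDead i w lst[pvBAdvance lst i w p] = false) := by
  intro m
  induction m with
  | zero =>
    intro p hm hp
    have hpe : p = lst.length := by omega
    have hadv : pvBAdvance lst i w p = p := by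
      rw [pvBAdvance]
      rw [dif_neg (by omega)]
    rw [hadv]
    exact ⟨⟨le_refl p, by omega⟩, fun idx h h1 h2 => by omega, fun h => by omega⟩
  | succ m ih =>
    intro p hm hp
    have hplt : p < lst.length := by omega
    rw [pvBAdvance, dif_pos hplt]
    cases hc : (decide (lst[p] ≤ i) || PySem.List.pyGetD w lst[p] false) with
    | true =>
      rw [if_pos rfl]
      obtain ⟨hb, hmid, hstop⟩ := ih (p + 1) (by omega) (by omega)
      refine ⟨⟨by omega, hb.2⟩, ?_, hstop⟩
      intro idx h h1 h2
      by_cases hip : idx = p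
      · subst hip
        exact hc
      · exact hmid idx h (by omega) h2
    | false =>
      rw [if_neg Bool.false_ne_true]
      exact ⟨⟨le_refl p, by omega⟩, fun idx h h1 h2 => by omega, fun h => hc⟩

lemma pvFind_dead_prefix (lst : List Int) (i : Int) (w : List Bool) :
    ∀ (r : Nat), r ≤ lst.length →
    (∀ idx (h : idx < lst.length), idx < r → pvDead i w lst[idx] = true) →
    (∀ h : r < lst.length, pvDead i w lst[r] = false) →
    lst.find? (fun j => decide (i < j) && !(PySem.List.pyGetD w j false)) = lst[r]? := by
  induction lst with
  | nil =>
    intro r hr hdead halive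
    simp
  | cons x tl ih =>
    intro r hr hdead halive
    cases r with
    | zero =>
      have hx : pvDead i w x = false := halive (by simp)
      rw [List.find?_cons_of_pos (h := by
        show (decide (i < x) && !(PySem.List.pyGetD w x false)) = true
        rw [pvElig_not_dead, hx]
        rfl)]
      rfl
    | succ r' =>
      have hx : pvDead i w x = true := hdead 0 (by simp) (by omega)
      rw [List.find?_cons_of_neg (h := by
        show ¬ (decide (i < x) && !(PySem.List.pyGetD w x false)) = true
        rw [pvElig_not_dead, hx]
        simp)]
      rw [List.length_cons] at hr
      rw [ih r' (by omega) (fun idx h h1 => hdead (idx + 1) (by simp; omega) (by omega))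
        (fun h => halive (by simp; omega))]
      rfl

-- the bucket-pointer invariant: every entry a pointer has passed is dead
def pvInv (c : List (List (String × Bool))) (i : Int) (w : List Bool)
    (pos : PySem.Dict (String × List (String × Bool) × Bool) Int) : Prop :=
  ∀ sig : String × List (String × Bool) × Bool,
    (pos.getD sig 0).toNat ≤ ((pvBBuckets c).getD sig []).length ∧
    ∀ idx (h : idx < ((pvBBuckets c).getD sig []).length),
      idx < (pos.getD sig 0).toNat → pvDead i w ((pvBBuckets c).getD sig [])[idx] = true

lemma pvStepP_eq (c : List (List (String × Bool))) (d : List (String × Bool))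
    (i : Int) (w : List Bool) (cand : String × Bool → Option Int)
    (hcand : ∀ kv : String × Bool, cand kv
      = ((pvBBuckets c).getD (pvBSigOf (pvBSortedItems d) kv.1 (!kv.2)) []).find?
          (fun j => decide (i < j) && !(PySem.List.pyGetD w j false)))
    (kv : String × Bool) (best : Option (Int × String))
    (pos : PySem.Dict (String × List (String × Bool) × Bool) Int)
    (hinv : pvInv c i w pos) :
    (pvBStepP (pvBBuckets c) d i w (best, pos) kv).1 = pvStep cand best kv
    ∧ pvInv c i w (pvBStepP (pvBBuckets c) d i w (best, pos) kv).2 := by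
  obtain ⟨hp0le, hp0dead⟩ :=
    hinv (pvBSigOf (pvBSortedItems d) kv.1 (!kv.2))
  set lst := (pvBBuckets c).getD (pvBSigOf (pvBSortedItems d) kv.1 (!kv.2)) [] with hlst
  set r := pvBAdvance lst i w
    ((pos.getD (pvBSigOf (pvBSortedItems d) kv.1 (!kv.2)) 0).toNat) with hradv
  have hred : pvBStepP (pvBBuckets c) d i w (best, pos) kv
      = (match lst[r]? with
         | none => (best, pos.insert (pvBSigOf (pvBSortedItems d) kv.1 (!kv.2)) ((r : Nat) : Int))
         | some j =>
           (match best with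
            | none => some (j, kv.1)
            | some q => if j < q.1 then some (j, kv.1) else some q,
            pos.insert (pvBSigOf (pvBSortedItems d) kv.1 (!kv.2)) ((r : Nat) : Int))) := rfl
  rw [hred]
  obtain ⟨⟨hrb1, hrb2⟩, hmid, hstop⟩ :=
    pvBAdvance_spec lst i w
      (lst.length - (pos.getD (pvBSigOf (pvBSortedItems d) kv.1 (!kv.2)) 0).toNat)
      ((pos.getD (pvBSigOf (pvBSortedItems d) kv.1 (!kv.2)) 0).toNat) rfl hp0le
  have hdeadpre : ∀ idx (h : idx < lst.length), idx < r → pvDead i w lst[idx] = true := by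
    intro idx h hlt
    by_cases hidx : idx < (pos.getD (pvBSigOf (pvBSortedItems d) kv.1 (!kv.2)) 0).toNat
    · exact hp0dead idx h hidx
    · exact hmid idx h (by omega) hlt
  have hfind : cand kv = lst[r]? := by
    rw [hcand kv]
    exact pvFind_dead_prefix lst i w r hrb2 hdeadpre hstop
  have hinv' : pvInv c i w
      (pos.insert (pvBSigOf (pvBSortedItems d) kv.1 (!kv.2)) ((r : Nat) : Int)) := by
    intro sig'
    by_cases hsig : sig' = pvBSigOf (pvBSortedItems d) kv.1 (!kv.2)
    · subst hsig
      rw [PySem.Dict.getD_insert_self, Int.toNat_natCast]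
      exact ⟨hrb2, fun idx h hlt => hdeadpre idx h hlt⟩
    · rw [PySem.Dict.getD_insert, if_neg hsig]
      exact hinv sig'
  cases hlr : lst[r]? with
  | none =>
    refine ⟨?_, hinv'⟩
    unfold pvStep
    rw [show cand kv = none from hfind.trans hlr]
  | some j =>
    refine ⟨?_, hinv'⟩
    unfold pvStep
    rw [show cand kv = some j from hfind.trans hlr]

lemma pvBBestP_fold (c : List (List (String × Bool))) (d : List (String × Bool))
    (i : Int) (w : List Bool) (cand : String × Bool → Option Int)
    (hcand : ∀ kv : String × Bool, cand kv
      = ((pvBBuckets c).getD (pvBSigOf (pvBSortedItems d) kv.1 (!kv.2)) []).find?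
          (fun j => decide (i < j) && !(PySem.List.pyGetD w j false)))
    (l : List (String × Bool)) :
    ∀ (best : Option (Int × String))
      (pos : PySem.Dict (String × List (String × Bool) × Bool) Int),
    pvInv c i w pos →
    (l.foldl (pvBStepP (pvBBuckets c) d i w) (best, pos)).1
      = l.foldl (pvStep cand) best
    ∧ pvInv c i w (l.foldl (pvBStepP (pvBBuckets c) d i w) (best, pos)).2 := by
  induction l with
  | nil =>
    intro best pos hinv
    exact ⟨rfl, hinv⟩
  | cons a tl ih =>
    intro best pos hinv
    rw [List.foldl_cons, List.foldl_cons]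
    obtain ⟨h1, h2⟩ := pvStepP_eq c d i w cand hcand a best pos hinv
    have hsplit : pvBStepP (pvBBuckets c) d i w (best, pos) a
        = ((pvBStepP (pvBBuckets c) d i w (best, pos) a).1,
           (pvBStepP (pvBBuckets c) d i w (best, pos) a).2) := rfl
    rw [hsplit, h1]
    exact ih _ _ h2

lemma pvBBestP_eq (c : List (List (String × Bool))) (d : List (String × Bool))
    (i : Int) (w : List Bool)
    (pos : PySem.Dict (String × List (String × Bool) × Bool) Int)
    (hinv : pvInv c i w pos) :
    (pvBBestP (pvBBuckets c) pos w i d).1 = pvBBest (pvBBuckets c) w i d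
    ∧ pvInv c i w (pvBBestP (pvBBuckets c) pos w i d).2 :=
  pvBBestP_fold c d i w
    (fun kv => ((pvBBuckets c).getD (pvBSigOf (pvBSortedItems d) kv.1 (!kv.2)) []).find?
        (fun j => decide (i < j) && !(PySem.List.pyGetD w j false)))
    (fun _ => rfl) d none pos hinv

lemma pvInv_mono_i (c : List (List (String × Bool))) (i i' : Int) (w : List Bool)
    (pos : PySem.Dict (String × List (String × Bool) × Bool) Int)
    (hle : i ≤ i') (hinv : pvInv c i w pos) : pvInv c i' w pos := by
  intro sig
  obtain ⟨h1, h2⟩ := hinv sig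
  refine ⟨h1, ?_⟩
  intro idx h hlt
  have := h2 idx h hlt
  unfold pvDead at this ⊢
  rw [Bool.or_eq_true] at this
  rcases this with hd | hd
  · rw [decide_eq_true
      (by have := of_decide_eq_true hd; omega : ((pvBBuckets c).getD sig [])[idx] ≤ i')]
    rfl
  · rw [hd, Bool.or_true]

lemma pvInv_set (c : List (List (String × Bool)))
    (hPre : ∀ d ∈ c, (d.map Prod.fst).Nodup)
    (i : Int) (w : List Bool) (hwlen : w.length = c.length) (ts : Nat)
    (pos : PySem.Dict (String × List (String × Bool) × Bool) Int)
    (hinv : pvInv c i w pos) : pvInv c i (w.set ts true) pos := by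
  intro sig
  obtain ⟨h1, h2⟩ := hinv sig
  refine ⟨h1, ?_⟩
  intro idx h hlt
  have hd := h2 idx h hlt
  unfold pvDead at hd ⊢
  rw [Bool.or_eq_true] at hd
  rcases hd with hd | hd
  · rw [hd]
    rfl
  · have hmem : ((pvBBuckets c).getD sig [])[idx] ∈ (pvBBuckets c).getD sig [] :=
      List.getElem_mem _
    obtain ⟨t, ht, hte, -⟩ := (pvBucket_mem c hPre sig _).1 hmem
    rw [hte] at hd ⊢
    rw [PySem.List.pyGetD_natCast] at hd ⊢
    have hset : (w.set ts true).getD t false = true := by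
      rw [List.getD_eq_getElem?_getD, List.getElem?_set]
      split_ifs with hts1 hts2
      · rfl
      · exact absurd (by omega : ts < w.length) hts2
      · rw [← List.getD_eq_getElem?_getD]
        exact hd
    rw [hset, Bool.or_true]

lemma pvPos0_getD (ks : List (String × List (String × Bool) × Bool))
    (d0 : PySem.Dict (String × List (String × Bool) × Bool) Int)
    (h0 : ∀ k, d0.getD k 0 = 0) (k : String × List (String × Bool) × Bool) :
    (ks.foldl (fun d s => d.insert s (0 : Int)) d0).getD k 0 = 0 := by
  induction ks generalizing d0 with
  | nil => exact h0 k
  | cons a tl ih =>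
    rw [List.foldl_cons]
    refine ih _ ?_
    intro k'
    rw [PySem.Dict.getD_insert]
    split_ifs with h
    · rfl
    · exact h0 k'

lemma pvBLoop_eq_F (c : List (List (String × Bool)))
    (hPre : ∀ d ∈ c, (d.map Prod.fst).Nodup) (m : Nat) :
    ∀ (a : Nat), c.length - a = m →
    ∀ (w : List Bool) (pos : PySem.Dict (String × List (String × Bool) × Bool) Int),
    w.length = c.length → pvInv c (a : Int) w pos →
    pvBLoop (pvBBuckets c) (PySem.List.enumerate (c.drop a) (a : Int)) w pos
      = pvBLoopF (pvBBuckets c) (PySem.List.enumerate (c.drop a) (a : Int)) w := by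
  induction m with
  | zero =>
    intro a hm w pos hwlen hinv
    have hnil : c.drop a = [] := List.drop_eq_nil_of_le (by omega)
    rw [hnil]
    rfl
  | succ m ih =>
    intro a hm w pos hwlen hinv
    have ha : a < c.length := by omega
    have hdrop : c.drop a = c.getD a [] :: c.drop (a + 1) := by
      rw [List.getD_eq_getElem c [] ha]
      exact List.drop_eq_getElem_cons ha
    rw [hdrop, PySem.List.enumerate_cons]
    have hcast : (a : Int) + 1 = ((a + 1 : Nat) : Int) := by push_cast; ring
    have hmono : pvInv c ((a + 1 : Nat) : Int) w pos :=
      pvInv_mono_i c _ _ w pos (by push_cast; omega) hinv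
    cases hu : PySem.List.pyGetD w (a : Int) false with
    | true =>
      have hL : pvBLoop (pvBBuckets c)
          (((a : Int), c.getD a []) :: PySem.List.enumerate (c.drop (a + 1)) ((a : Int) + 1)) w pos
          = pvBLoop (pvBBuckets c) (PySem.List.enumerate (c.drop (a + 1)) ((a : Int) + 1)) w pos := by
        simp only [pvBLoop]
        rw [hu, if_pos rfl]
      have hR : pvBLoopF (pvBBuckets c)
          (((a : Int), c.getD a []) :: PySem.List.enumerate (c.drop (a + 1)) ((a : Int) + 1)) w
          = pvBLoopF (pvBBuckets c) (PySem.List.enumerate (c.drop (a + 1)) ((a : Int) + 1)) w := by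
        simp only [pvBLoopF]
        rw [hu, if_pos rfl]
      rw [hL, hR, hcast]
      exact ih (a + 1) (by omega) w pos hwlen hmono
    | false =>
      obtain ⟨hfst, hinv'⟩ := pvBBestP_eq c (c.getD a []) (a : Int) w pos hinv
      have hsplit : pvBBestP (pvBBuckets c) pos w (a : Int) (c.getD a [])
          = ((pvBBestP (pvBBuckets c) pos w (a : Int) (c.getD a [])).1,
             (pvBBestP (pvBBuckets c) pos w (a : Int) (c.getD a [])).2) := rfl
      set pos' := (pvBBestP (pvBBuckets c) pos w (a : Int) (c.getD a [])).2 with hpos'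
      cases hbb : pvBBest (pvBBuckets c) w (a : Int) (c.getD a []) with
      | none =>
        have hL : pvBLoop (pvBBuckets c)
            (((a : Int), c.getD a []) :: PySem.List.enumerate (c.drop (a + 1)) ((a : Int) + 1)) w pos
            = c.getD a [] :: pvBLoop (pvBBuckets c)
                (PySem.List.enumerate (c.drop (a + 1)) ((a : Int) + 1)) w pos' := by
          simp only [pvBLoop]
          rw [hu, if_neg Bool.false_ne_true, hsplit, hfst, hbb]
        have hR : pvBLoopF (pvBBuckets c)
            (((a : Int), c.getD a []) :: PySem.List.enumerate (c.drop (a + 1)) ((a : Int) + 1)) w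
            = c.getD a [] :: pvBLoopF (pvBBuckets c)
                (PySem.List.enumerate (c.drop (a + 1)) ((a : Int) + 1)) w := by
          simp only [pvBLoopF]
          rw [hu, if_neg Bool.false_ne_true, hbb]
        rw [hL, hR, hcast, ih (a + 1) (by omega) w pos' hwlen
          (pvInv_mono_i c _ _ w pos' (by push_cast; omega) hinv')]
      | some q =>
        obtain ⟨j, k⟩ := q
        obtain ⟨ts, rfl, hats, hts⟩ := pvBBest_some_shape c hPre a w (c.getD a []) j k hbb
        have hL : pvBLoop (pvBBuckets c)
            (((a : Int), c.getD a []) :: PySem.List.enumerate (c.drop (a + 1)) ((a : Int) + 1)) w pos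
            = (c.getD a []).filter (fun kv => kv.1 != k)
              :: pvBLoop (pvBBuckets c) (PySem.List.enumerate (c.drop (a + 1)) ((a : Int) + 1))
                  (PySem.List.pySetD w ((ts : Nat) : Int) true) pos' := by
          simp only [pvBLoop]
          rw [hu, if_neg Bool.false_ne_true, hsplit, hfst, hbb]
        have hR : pvBLoopF (pvBBuckets c)
            (((a : Int), c.getD a []) :: PySem.List.enumerate (c.drop (a + 1)) ((a : Int) + 1)) w
            = (c.getD a []).filter (fun kv => kv.1 != k)
              :: pvBLoopF (pvBBuckets c) (PySem.List.enumerate (c.drop (a + 1)) ((a : Int) + 1))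
                  (PySem.List.pySetD w ((ts : Nat) : Int) true) := by
          simp only [pvBLoopF]
          rw [hu, if_neg Bool.false_ne_true, hbb]
        have hwset : PySem.List.pySetD w ((ts : Nat) : Int) true = w.set ts true := by
          rw [PySem.List.pySetD_natCast]
        have hinvset : pvInv c ((a + 1 : Nat) : Int) (w.set ts true) pos' :=
          pvInv_mono_i c _ _ _ pos' (by push_cast; omega)
            (pvInv_set c hPre (a : Int) w hwlen ts pos' hinv')
        rw [hL, hR, hcast, hwset, ih (a + 1) (by omega) (w.set ts true) pos'
          (by rw [List.length_set]; exact hwlen) hinvset]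

-- clean-up passes agree
lemma pvClean_eq (d : List (String × Bool)) : pvACleanOne d = pvBCleanOne d := by
  unfold pvACleanOne pvBCleanOne
  apply List.filter_congr
  intro kv _
  have hmem : ∀ x : String,
      PySem.Set.contains (PySem.Set.ofList ((d.map Prod.fst).filterMap
        (fun k => if pvAHasGE k then some (pvABase k) else none))) x = true
      ↔ ∃ kv2 ∈ d, pvAHasGE kv2.1 = true ∧ pvABase kv2.1 = x := by
    intro x
    rw [PySem.Set.contains_iff, PySem.Set.mem_ofList, List.mem_filterMap]
    constructor
    · rintro ⟨a, ha, hf⟩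
      rw [List.mem_map] at ha
      obtain ⟨kv2, hkv2, rfl⟩ := ha
      by_cases hg : pvAHasGE kv2.1 = true
      · rw [if_pos hg] at hf
        exact ⟨kv2, hkv2, hg, Option.some_inj.1 hf⟩
      · rw [if_neg hg] at hf; cases hf
    · rintro ⟨kv2, hkv2, hg, hb⟩
      exact ⟨kv2.1, List.mem_map_of_mem hkv2, by rw [if_pos hg, hb]⟩
  have hBA : pvBHasGE = pvAHasGE := rfl
  have hBB : pvBBase = pvABase := rfl
  rw [hBA, hBB]
  cases hg : pvAHasGE kv.1 with
  | true => rw [Bool.or_true, Bool.true_or]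
  | false =>
    rw [Bool.or_false, Bool.false_or, Bool.eq_iff_iff, Bool.not_eq_true', List.all_eq_true]
    constructor
    · intro hc kv2 hkv2
      rw [Bool.not_eq_true', Bool.and_eq_false_iff]
      by_cases hg2 : pvAHasGE kv2.1 = true
      · right
        rw [beq_eq_false_iff_ne]
        intro hb2
        have := (hmem (pvABase kv.1)).2 ⟨kv2, hkv2, hg2, hb2⟩
        rw [hc] at this
        cases this
      · left
        exact Bool.eq_false_iff.2 hg2
    · intro hall
      by_contra hcne
      rw [Bool.not_eq_false] at hcne
      obtain ⟨kv2, hkv2, hg2, hb2⟩ := (hmem _).1 hcne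
      have := hall kv2 hkv2
      rw [Bool.not_eq_true', Bool.and_eq_false_iff] at this
      rcases this with h' | h'
      · rw [hg2] at h'; cases h'
      · rw [beq_eq_false_iff_ne] at h'
        exact h' hb2

-- ===== VERDICT (by name: the statement is the Claim_ definition above) =====
theorem consolidate_opposites_and_remove_bases_spec : Claim_equal_consolidate_opposites_and_remove_bases := by
  intro c _ hpre
  show consolidate_opposites_and_remove_bases c = consolidate_opposites_and_remove_bases_alt c
  unfold consolidate_opposites_and_remove_bases consolidate_opposites_and_remove_bases_alt
  have hmain := pvOuter_eq c hpre c.length 0 (by omega) PySem.Set.empty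
    (List.replicate c.length false) [] (by simp)
    (fun t ht h0 => by
      show PySem.Set.contains (PySem.Set.empty : PySem.Set Int) (t : Int) = _
      rw [show PySem.Set.contains (PySem.Set.empty : PySem.Set Int) (t : Int) = false from rfl,
          List.getD_eq_getElem?_getD, List.getElem?_replicate]
      split_ifs
      all_goals rfl)
  have hptr := pvBLoop_eq_F c hpre c.length 0 (by omega)
    (List.replicate c.length false)
    ((pvBBuckets c).keys.foldl (fun d s => d.insert s (0 : Int)) PySem.Dict.empty)
    (by simp)
    (by
      intro sig
      rw [pvPos0_getD _ _ (fun k => PySem.Dict.getD_empty k 0) sig]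
      exact ⟨by omega, fun idx h hlt => by omega⟩)
  rw [show PySem.List.enumerate c = PySem.List.enumerate (c.drop 0) ((0 : Nat) : Int) by
        rw [List.drop_zero]; rfl]
  rw [hmain, hptr, List.nil_append, funext pvClean_eq]
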